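-- pv_equiv track=rewrite | github.com/Kregiss/TFL | lab2/fuzz_test.py | simulate_afa
-- ===== SOURCE A (Python) =====
-- from typing import Dict, Set, Tuple, List
--
-- def simulate_afa(nfa1_trans, nfa1_start, nfa1_finals,
--                  nfa2_trans, nfa2_start, nfa2_finals,
--                  word: str):
--
--     cur1: Set[str] = {nfa1_start}
--     cur2: Set[str] = {nfa2_start}
--
--     for ch in word:
--         nxt1: Set[str] = set()
--         nxt2: Set[str] = set()
--
--         for s in cur1:
--             if s in nfa1_trans and ch in nfa1_trans[s]:
--                 nxt1.update(nfa1_trans[s][ch])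
--         for s in cur2:
--             if s in nfa2_trans and ch in nfa2_trans[s]:
--                 nxt2.update(nfa2_trans[s][ch])
--
--         cur1, cur2 = nxt1, nxt2
--         if not cur1 or not cur2:
--             return False
--
--     return any(s in nfa1_finals for s in cur1) and any(s in nfa2_finals for s in cur2)
-- ===== SOURCE B (Python) =====
-- def _accepts(trans, start, finals, word):
--     # Backward reachability: acc = states from which the remaining suffix can reach a final state.
--     acc = set(finals)
--     for ch in reversed(word):
--         if not acc:
--             break
--         acc = {s for s in trans
--                if ch in trans[s] and not acc.isdisjoint(trans[s][ch])}
--     return start in acc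
--
--
-- def simulate_afa(nfa1_trans, nfa1_start, nfa1_finals,
--                  nfa2_trans, nfa2_start, nfa2_finals,
--                  word: str):
--     return (_accepts(nfa1_trans, nfa1_start, nfa1_finals, word)
--             and _accepts(nfa2_trans, nfa2_start, nfa2_finals, word))
-- ===== Notes on version B (the rewrite author's own statement) =====
-- stated objective: alternative
-- what changed: Replaces A's forward subset-construction (evolving the set of currently reachable states left-to-right, with an early exit when it empties) by backward reachability: scanning the word right-to-left it computes the set of states from which the remaining suffix can reach a final state, and finally tests whether the start state belongs to it; correct because start reaches a final state over the word iff start is backward-reachable from the finals, and an emptied forward set means no acceptance either way.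
import Mathlib
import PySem

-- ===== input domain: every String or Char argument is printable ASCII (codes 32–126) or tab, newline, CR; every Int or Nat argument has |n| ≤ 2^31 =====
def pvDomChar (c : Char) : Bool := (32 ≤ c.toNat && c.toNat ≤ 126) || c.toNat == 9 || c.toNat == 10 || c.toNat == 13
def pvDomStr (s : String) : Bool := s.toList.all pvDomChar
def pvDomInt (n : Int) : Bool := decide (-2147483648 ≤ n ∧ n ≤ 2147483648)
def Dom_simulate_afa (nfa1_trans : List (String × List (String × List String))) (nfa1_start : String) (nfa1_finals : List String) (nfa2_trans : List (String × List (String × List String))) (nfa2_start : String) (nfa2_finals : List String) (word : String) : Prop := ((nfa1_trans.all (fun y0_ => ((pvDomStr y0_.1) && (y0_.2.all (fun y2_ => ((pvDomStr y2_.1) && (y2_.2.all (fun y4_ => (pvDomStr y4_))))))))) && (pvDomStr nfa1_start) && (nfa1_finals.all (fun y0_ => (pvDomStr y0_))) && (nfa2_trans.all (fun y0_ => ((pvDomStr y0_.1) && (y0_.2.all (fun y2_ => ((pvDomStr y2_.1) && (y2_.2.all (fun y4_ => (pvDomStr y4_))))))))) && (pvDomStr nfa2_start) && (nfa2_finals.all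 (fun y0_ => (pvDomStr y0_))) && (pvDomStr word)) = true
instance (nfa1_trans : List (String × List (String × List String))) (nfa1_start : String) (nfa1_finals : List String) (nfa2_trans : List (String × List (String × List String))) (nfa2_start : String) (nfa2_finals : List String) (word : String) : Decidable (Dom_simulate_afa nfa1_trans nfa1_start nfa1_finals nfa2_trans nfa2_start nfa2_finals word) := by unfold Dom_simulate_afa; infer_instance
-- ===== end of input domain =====

-- B replaces A's forward subset simulation by backward reachability from the final states (alternative algorithm, same cost).

-- ===== PORT A =====
-- A: one interleaved forward loop over the word stepping BOTH NFA state sets, early False when either empties.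
def pvStepA (trans : List (String × List (String × List String))) (cur : PySem.Set String) (ch : Char) : PySem.Set String :=
  cur.foldl (fun nxt s =>
    match (PySem.Dict.mk trans).get? s with
    | none => nxt
    | some row =>
      match (PySem.Dict.mk row).get? (String.ofList [ch]) with
      | none => nxt
      | some lst => PySem.Set.update nxt lst) PySem.Set.empty

def pvLoopA (nfa1_trans : List (String × List (String × List String))) (nfa1_finals : List String)
    (nfa2_trans : List (String × List (String × List String))) (nfa2_finals : List String)
    (cs : List Char) (cur1 cur2 : PySem.Set String) : Bool :=
  match cs with
  | [] => (cur1.any (fun s => nfa1_finals.contains s)) && (cur2.any (fun s => nfa2_finals.contains s))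
  | ch :: rest =>
    let nxt1 := pvStepA nfa1_trans cur1 ch
    let nxt2 := pvStepA nfa2_trans cur2 ch
    if nxt1.isEmpty || nxt2.isEmpty then false
    else pvLoopA nfa1_trans nfa1_finals nfa2_trans nfa2_finals rest nxt1 nxt2

def simulate_afa (nfa1_trans : List (String × List (String × List String))) (nfa1_start : String) (nfa1_finals : List String) (nfa2_trans : List (String × List (String × List String))) (nfa2_start : String) (nfa2_finals : List String) (word : String) : Bool :=
  pvLoopA nfa1_trans nfa1_finals nfa2_trans nfa2_finals word.toList
    (PySem.Set.ofList [nfa1_start]) (PySem.Set.ofList [nfa2_start])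

-- ===== PORT B =====
-- B: right-to-left pass computing {s | the remaining suffix can lead s to a final state}; answer = start ∈ that set.
def pvPredSetB (trans : List (String × List (String × List String))) (ch : Char) (acc : PySem.Set String) : PySem.Set String :=
  PySem.Set.ofList ((PySem.Dict.mk trans).keys.filter (fun s =>
    match (PySem.Dict.mk trans).get? s with
    | none => false
    | some row =>
      match (PySem.Dict.mk row).get? (String.ofList [ch]) with
      | none => false
      | some lst => !(PySem.Set.isdisjoint acc lst)))

-- the 'if acc.isEmpty then acc' branch is Source B's 'if not acc: break' (an empty set stays empty, so skipping the rest is the break)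
def pvAcceptsB (trans : List (String × List (String × List String))) (start : String) (finals : List String) (cs : List Char) : Bool :=
  let acc := cs.reverse.foldl (fun acc ch => if acc.isEmpty then acc else pvPredSetB trans ch acc) (PySem.Set.ofList finals)
  PySem.Set.contains acc start

def simulate_afa_alt (nfa1_trans : List (String × List (String × List String))) (nfa1_start : String) (nfa1_finals : List String) (nfa2_trans : List (String × List (String × List String))) (nfa2_start : String) (nfa2_finals : List String) (word : String) : Bool :=
  pvAcceptsB nfa1_trans nfa1_start nfa1_finals word.toList &&
  pvAcceptsB nfa2_trans nfa2_start nfa2_finals word.toList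

-- ===== PRECONDITION & SPEC =====
def Spec_simulate_afa (nfa1_trans : List (String × List (String × List String))) (nfa1_start : String) (nfa1_finals : List String) (nfa2_trans : List (String × List (String × List String))) (nfa2_start : String) (nfa2_finals : List String) (word : String) (out : Bool) : Prop := out = simulate_afa_alt nfa1_trans nfa1_start nfa1_finals nfa2_trans nfa2_start nfa2_finals word
instance (nfa1_trans : List (String × List (String × List String))) (nfa1_start : String) (nfa1_finals : List String) (nfa2_trans : List (String × List (String × List String))) (nfa2_start : String) (nfa2_finals : List String) (word : String) (out : Bool) : Decidable (Spec_simulate_afa nfa1_trans nfa1_start nfa1_finals nfa2_trans nfa2_start nfa2_finals word out) := by unfold Spec_simulate_afa; infer_instance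

-- ===== CLAIM (what is proved, stated in full; the proofs are below) =====
def Claim_equal_simulate_afa : Prop := ∀ (nfa1_trans : List (String × List (String × List String))) (nfa1_start : String) (nfa1_finals : List String) (nfa2_trans : List (String × List (String × List String))) (nfa2_start : String) (nfa2_finals : List String) (word : String), Dom_simulate_afa nfa1_trans nfa1_start nfa1_finals nfa2_trans nfa2_start nfa2_finals word → Spec_simulate_afa nfa1_trans nfa1_start nfa1_finals nfa2_trans nfa2_start nfa2_finals word (simulate_afa nfa1_trans nfa1_start nfa1_finals nfa2_trans nfa2_start nfa2_finals word)

-- ===== LEMMAS AND PROOFS =====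

-- successor list of a single state under one character (proof-side view of both ports' lookups)
def pvSucc (trans : List (String × List (String × List String))) (ch : Char) (s : String) : List String :=
  match (PySem.Dict.mk trans).get? s with
  | none => []
  | some row =>
    match (PySem.Dict.mk row).get? (String.ofList [ch]) with
    | none => []
    | some lst => lst

-- the backward set of a suffix, structurally
def pvBack (trans : List (String × List (String × List String))) (finals : List String) : List Char → PySem.Set String
  | [] => PySem.Set.ofList finals
  | ch :: rest => pvPredSetB trans ch (pvBack trans finals rest)

theorem pvPredSetB_empty (trans : List (String × List (String × List String))) (ch : Char) :
    pvPredSetB trans ch [] = [] := by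
  unfold pvPredSetB
  have h : ((PySem.Dict.mk trans).keys.filter (fun s =>
      match (PySem.Dict.mk trans).get? s with
      | none => false
      | some row =>
        match (PySem.Dict.mk row).get? (String.ofList [ch]) with
        | none => false
        | some lst => !(PySem.Set.isdisjoint ([] : PySem.Set String) lst))) = [] := by
    rw [List.filter_eq_nil_iff]
    intro s _
    cases hg : (PySem.Dict.mk trans).get? s with
    | none => simp
    | some row =>
      dsimp only
      cases hr : (PySem.Dict.mk row).get? (String.ofList [ch]) with
      | none => simp
      | some lst =>
        have hd : PySem.Set.isdisjoint ([] : PySem.Set String) lst = true :=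
          (PySem.Set.isdisjoint_iff _ _).mpr (by simp)
        simp [hd]
  rw [h]
  rfl

theorem pvStepIf_eq (trans : List (String × List (String × List String))) (ch : Char) (acc : PySem.Set String) :
    (if acc.isEmpty then acc else pvPredSetB trans ch acc) = pvPredSetB trans ch acc := by
  by_cases h : acc.isEmpty
  · rw [List.isEmpty_iff] at h
    subst h
    rw [pvPredSetB_empty]
    simp
  · rw [if_neg h]

theorem pvFoldrev_eq_back (trans : List (String × List (String × List String))) (finals : List String) (cs : List Char) :
    cs.reverse.foldl (fun acc ch => if acc.isEmpty then acc else pvPredSetB trans ch acc) (PySem.Set.ofList finals) = pvBack trans finals cs := by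
  have hstep : (fun (acc : PySem.Set String) ch => if acc.isEmpty then acc else pvPredSetB trans ch acc) =
      fun acc ch => pvPredSetB trans ch acc := by
    funext acc ch; exact pvStepIf_eq trans ch acc
  rw [hstep]
  induction cs with
  | nil => rfl
  | cons ch rest ih =>
    simp only [List.reverse_cons, List.foldl_append, List.foldl_cons, List.foldl_nil, ih, pvBack]

theorem pvStepA_body_eq (trans : List (String × List (String × List String))) (ch : Char)
    (nxt : PySem.Set String) (s : String) :
    (match (PySem.Dict.mk trans).get? s with
     | none => nxt
     | some row =>
       match (PySem.Dict.mk row).get? (String.ofList [ch]) with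
       | none => nxt
       | some lst => PySem.Set.update nxt lst) = PySem.Set.update nxt (pvSucc trans ch s) := by
  unfold pvSucc
  cases hg : (PySem.Dict.mk trans).get? s with
  | none => rfl
  | some row =>
    dsimp only
    cases hr : (PySem.Dict.mk row).get? (String.ofList [ch]) with
    | none => rfl
    | some lst => rfl

theorem mem_foldl_update (cur : List String) (f : String → List String) (init : PySem.Set String) (y : String) :
    y ∈ cur.foldl (fun nxt s => PySem.Set.update nxt (f s)) init ↔ y ∈ init ∨ ∃ s ∈ cur, y ∈ f s := by
  induction cur generalizing init with
  | nil => simp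
  | cons a l ih =>
    rw [List.foldl_cons, ih]
    simp [PySem.Set.mem_update, or_assoc]

theorem mem_stepA (trans : List (String × List (String × List String))) (cur : PySem.Set String) (ch : Char) (y : String) :
    y ∈ pvStepA trans cur ch ↔ ∃ s ∈ cur, y ∈ pvSucc trans ch s := by
  unfold pvStepA
  have h : (fun (nxt : PySem.Set String) s =>
      (match (PySem.Dict.mk trans).get? s with
       | none => nxt
       | some row =>
         match (PySem.Dict.mk row).get? (String.ofList [ch]) with
         | none => nxt
         | some lst => PySem.Set.update nxt lst)) = fun nxt s => PySem.Set.update nxt (pvSucc trans ch s) := by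
    funext nxt s; exact pvStepA_body_eq trans ch nxt s
  rw [h, mem_foldl_update]
  simp [PySem.Set.empty]

theorem mem_predSetB (trans : List (String × List (String × List String))) (ch : Char) (acc : PySem.Set String) (s : String) :
    s ∈ pvPredSetB trans ch acc ↔ ∃ y ∈ pvSucc trans ch s, y ∈ acc := by
  unfold pvPredSetB pvSucc
  rw [PySem.Set.mem_ofList, List.mem_filter]
  cases hg : (PySem.Dict.mk trans).get? s with
  | none =>
    have hk : s ∉ (PySem.Dict.mk trans).keys := by
      rw [← PySem.Dict.get?_eq_none_iff_not_mem_keys]; exact hg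
    constructor
    · rintro ⟨hks, -⟩; exact absurd hks hk
    · rintro ⟨y, hy, -⟩; cases hy
  | some row =>
    have hk : s ∈ (PySem.Dict.mk trans).keys := by
      by_contra hn
      rw [← PySem.Dict.get?_eq_none_iff_not_mem_keys] at hn
      rw [hn] at hg; cases hg
    dsimp only
    cases hr : (PySem.Dict.mk row).get? (String.ofList [ch]) with
    | none => simp
    | some lst =>
      constructor
      · rintro ⟨-, h⟩
        simp only [Bool.not_eq_true'] at h
        have := mt (PySem.Set.isdisjoint_iff acc lst).mpr (by simp [h])
        push Not at this
        rcases this with ⟨y, hya, hyl⟩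
        exact ⟨y, hyl, hya⟩
      · rintro ⟨y, hyl, hya⟩
        refine ⟨hk, ?_⟩
        simp only [Bool.not_eq_true']
        by_contra hne
        have hd : PySem.Set.isdisjoint acc lst = true := by
          cases hdd : PySem.Set.isdisjoint acc lst
          · exact absurd hdd hne
          · rfl
        exact ((PySem.Set.isdisjoint_iff acc lst).mp hd) y hya hyl

-- the step lemma: forward one step then test against the backward set = test against its predecessor set
theorem any_stepA_eq (trans : List (String × List (String × List String))) (cur : PySem.Set String) (ch : Char) (B : PySem.Set String) :
    (pvStepA trans cur ch).any (fun y => B.contains y) = cur.any (fun s => (pvPredSetB trans ch B).contains s) := by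
  rw [Bool.eq_iff_iff]
  simp only [List.any_eq_true, PySem.Set.contains_iff, mem_predSetB]
  constructor
  · rintro ⟨y, hy, hyB⟩
    rcases (mem_stepA trans cur ch y).1 hy with ⟨s, hs, hys⟩
    exact ⟨s, hs, y, hys, hyB⟩
  · rintro ⟨s, hs, y, hys, hyB⟩
    exact ⟨y, (mem_stepA trans cur ch y).2 ⟨s, hs, hys⟩, hyB⟩

theorem any_contains_ofList (cur : PySem.Set String) (f : List String) :
    cur.any (fun s => f.contains s) = cur.any (fun s => (PySem.Set.ofList f).contains s) := by
  rw [Bool.eq_iff_iff]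
  simp [List.any_eq_true, PySem.Set.mem_ofList]

-- main invariant: A's interleaved forward loop = membership tests against B's backward sets
theorem pvLoop_eq_back (t1 t2 : List (String × List (String × List String))) (f1 f2 : List String)
    (cs : List Char) (cur1 cur2 : PySem.Set String) :
    pvLoopA t1 f1 t2 f2 cs cur1 cur2 =
      (cur1.any (fun s => (pvBack t1 f1 cs).contains s) && cur2.any (fun s => (pvBack t2 f2 cs).contains s)) := by
  induction cs generalizing cur1 cur2 with
  | nil =>
    simp only [pvLoopA, pvBack]
    rw [any_contains_ofList cur1 f1, any_contains_ofList cur2 f2]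
  | cons ch rest ih =>
    simp only [pvLoopA, pvBack]
    rw [← any_stepA_eq t1 cur1 ch, ← any_stepA_eq t2 cur2 ch]
    by_cases h1 : (pvStepA t1 cur1 ch).isEmpty
    · rw [List.isEmpty_iff] at h1
      simp [h1]
    · by_cases h2 : (pvStepA t2 cur2 ch).isEmpty
      · rw [List.isEmpty_iff] at h2
        simp [h2]
      · have h1' : (pvStepA t1 cur1 ch).isEmpty = false := by simpa using h1
        have h2' : (pvStepA t2 cur2 ch).isEmpty = false := by simpa using h2
        rw [h1', h2']
        simpa using ih (pvStepA t1 cur1 ch) (pvStepA t2 cur2 ch)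

-- ===== VERDICT (by name: the statement is the Claim_ definition above) =====
theorem simulate_afa_spec : Claim_equal_simulate_afa := by
  intro t1 s1 f1 t2 s2 f2 w _
  unfold Spec_simulate_afa simulate_afa simulate_afa_alt pvAcceptsB
  rw [pvFoldrev_eq_back, pvFoldrev_eq_back, pvLoop_eq_back]
  simp [PySem.Set.ofList, PySem.Set.add]
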